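-- pv_equiv track=rewrite | github.com/stokworks/AdventOfCode2020 | day17/day17_2.py | grow_cubes
-- ===== SOURCE A (Python) =====
-- def grow_cubes(cubes):
-- 	# grow w dimension
-- 	cubes.insert(0, [[[False
-- 		for x in range(len(cubes[0][z][y]))]
-- 		for y in range(len(cubes[0][z]))]
-- 		for z in range(len(cubes[0]))])
-- 	cubes.append([[[False
-- 		for x in range(len(cubes[0][z][y]))]
-- 		for y in range(len(cubes[0][z]))]
-- 		for z in range(len(cubes[0]))])
--
-- 	# grow z dimension
-- 	for w in range(len(cubes)):
-- 		cubes[w].insert(0,[[False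
-- 			for x in range(len(cubes[w][0][y]))]
-- 			for y in range(len(cubes[w][0]))])
-- 		cubes[w].append([[False
-- 			for x in range(len(cubes[w][0][y]))]
-- 			for y in range(len(cubes[w][0]))])
--
-- 	# grow y dimension
-- 	for w in range(len(cubes)):
-- 		for z in range(len(cubes[w])):
-- 			cubes[w][z].insert(0, [False
-- 				for x in range(len(cubes[w][z][0]))])
-- 			cubes[w][z].append([False
-- 				for x in range(len(cubes[w][z][0]))])
--
-- 	# grow x dimension
-- 	for w in range(len(cubes)):
-- 		for z in range(len(cubes[w])):
-- 			for y in range(len(cubes[w][z])):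
-- 				cubes[w][z][y].insert(0, False)
-- 				cubes[w][z][y].append(False)
--
-- 	return cubes
-- ===== SOURCE B (Python) =====
-- def grow_cubes(cubes):
--     def zero_like(g, ndim):
--         if ndim == 1:
--             return [False] * len(g)
--         return [zero_like(c, ndim - 1) for c in g]
--
--     def pad(g, ndim):
--         if ndim == 1:
--             return [False] + list(g) + [False]
--         body = [pad(c, ndim - 1) for c in g]
--         border = zero_like(body[0], ndim - 1)
--         return [border] + body + [border]
--
--     cubes[:] = pad(cubes, 4)
--     return cubes
-- ===== Notes on version B (the rewrite author's own statement) =====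
-- stated objective: simpler
-- what changed: Replaces A's four sequential in-place axis passes (each inserting/appending shape-matched all-False borders) with a single recursive pad over the nested-list structure that pads each level once; B mutates the argument via cubes[:] = padded so identity and return semantics match.
import Mathlib
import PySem

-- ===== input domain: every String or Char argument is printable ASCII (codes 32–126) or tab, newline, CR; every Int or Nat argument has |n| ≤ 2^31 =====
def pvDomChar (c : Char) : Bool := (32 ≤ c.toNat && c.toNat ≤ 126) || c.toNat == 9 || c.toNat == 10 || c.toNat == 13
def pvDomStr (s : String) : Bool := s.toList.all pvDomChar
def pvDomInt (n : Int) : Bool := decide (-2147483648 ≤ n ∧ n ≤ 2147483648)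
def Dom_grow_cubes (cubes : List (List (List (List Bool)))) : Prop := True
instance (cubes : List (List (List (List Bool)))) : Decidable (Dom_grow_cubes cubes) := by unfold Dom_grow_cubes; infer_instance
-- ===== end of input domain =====

-- B pads the 4D grid in one recursive pass over the nested-list structure instead of A's four
-- sequential axis passes (simpler decomposition, same cost); both Pythons mutate the argument in
-- place and return it — the equivalence proved here is about the RETURN value.

-- shared shape helpers (both Pythons build all-False borders of a given shape; A with nested
-- comprehensions over lens, B with zero_like) and the one-row pad both use
def zeroRow (r : List Bool) : List Bool := r.map (fun _ => false)
def zeroPlane (p : List (List Bool)) : List (List Bool) := p.map zeroRow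
def zeroSlab (s : List (List (List Bool))) : List (List (List Bool)) := s.map zeroPlane
def padRow (r : List Bool) : List Bool := false :: r ++ [false]

-- ===== PORT A =====
-- A's four in-place passes, transliterated functionally: each pass builds an all-False border
-- shaped like the current first element (insert front, then append shaped from the new head).

def growW (c : List (List (List (List Bool)))) : List (List (List (List Bool))) :=
  let c' := zeroSlab (c.headD []) :: c
  c' ++ [zeroSlab (c'.headD [])]

def growZslab (s : List (List (List Bool))) : List (List (List Bool)) :=
  let s' := zeroPlane (s.headD []) :: s
  s' ++ [zeroPlane (s'.headD [])]

def growYplane (p : List (List Bool)) : List (List Bool) :=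
  let p' := zeroRow (p.headD []) :: p
  p' ++ [zeroRow (p'.headD [])]

def grow_cubes (cubes : List (List (List (List Bool)))) : List (List (List (List Bool))) :=
  let c1 := growW cubes                                   -- grow w dimension
  let c2 := c1.map growZslab                              -- grow z dimension
  let c3 := c2.map (fun s => s.map growYplane)            -- grow y dimension
  c3.map (fun s => s.map (fun p => p.map padRow))       -- grow x dimension

-- ===== PORT B =====
def padB2 (g : List (List Bool)) : List (List Bool) :=
  let body := g.map padRow
  let border := zeroRow (body.headD [])
  border :: body ++ [border]
def padB3 (g : List (List (List Bool))) : List (List (List Bool)) :=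
  let body := g.map padB2
  let border := zeroPlane (body.headD [])
  border :: body ++ [border]
def padB4 (g : List (List (List (List Bool)))) : List (List (List (List Bool))) :=
  let body := g.map padB3
  let border := zeroSlab (body.headD [])
  border :: body ++ [border]

def grow_cubes_alt (cubes : List (List (List (List Bool)))) : List (List (List (List Bool))) :=
  padB4 cubes

-- ===== PRECONDITION & SPEC =====
-- Pre_ excludes exactly the inputs on which A raises IndexError (an empty grid, an empty w-slab
-- or an empty z-plane, whose first element A indexes); B raises IndexError there too.
def Pre_grow_cubes (cubes : List (List (List (List Bool)))) : Prop :=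
  cubes ≠ [] ∧ ∀ s ∈ cubes, s ≠ [] ∧ ∀ p ∈ s, p ≠ []
instance (cubes : List (List (List (List Bool)))) : Decidable (Pre_grow_cubes cubes) := by
  unfold Pre_grow_cubes; infer_instance

def pvWitness_grow_cubes : List (List (List (List Bool))) := [[[[true]]]]

def Spec_grow_cubes (cubes : List (List (List (List Bool)))) (out : List (List (List (List Bool)))) : Prop := out = grow_cubes_alt cubes
instance (cubes : List (List (List (List Bool)))) (out : List (List (List (List Bool)))) : Decidable (Spec_grow_cubes cubes out) := by unfold Spec_grow_cubes; infer_instance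

-- ===== CLAIM (what is proved, stated in full; the proofs are below) =====
def Claim_equal_grow_cubes : Prop := ∀ (cubes : List (List (List (List Bool)))), Dom_grow_cubes cubes → Pre_grow_cubes cubes → Spec_grow_cubes cubes (grow_cubes cubes)

-- ===== LEMMAS AND PROOFS =====

lemma z1_idem (r : List Bool) : zeroRow (zeroRow r) = zeroRow r := by
  simp [zeroRow]

lemma z2_idem (p : List (List Bool)) : zeroPlane (zeroPlane p) = zeroPlane p := by
  simp [zeroPlane, List.map_map, Function.comp_def, z1_idem]

lemma pad2_z2 (p : List (List Bool)) (h : p ≠ []) :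
    padB2 (zeroPlane p) = zeroPlane (padB2 p) := by
  obtain ⟨r, t, rfl⟩ := List.exists_cons_of_ne_nil h
  simp only [padB2, zeroPlane, zeroRow, padRow, List.map_cons, List.map_append,
    List.map_map, Function.comp_def, List.headD_cons, List.cons_append, List.map_nil]

lemma z3_idem (s : List (List (List Bool))) : zeroSlab (zeroSlab s) = zeroSlab s := by
  simp [zeroSlab, List.map_map, Function.comp_def, z2_idem]

lemma pad3_z3 (s : List (List (List Bool))) (h1 : s ≠ []) (h2 : ∀ p ∈ s, p ≠ []) :
    padB3 (zeroSlab s) = zeroSlab (padB3 s) := by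
  obtain ⟨p0, u, rfl⟩ := List.exists_cons_of_ne_nil h1
  have hp0 : p0 ≠ [] := h2 p0 (by simp)
  have hbody : ∀ p ∈ u, padB2 (zeroPlane p) = zeroPlane (padB2 p) :=
    fun p hp => pad2_z2 p (h2 p (by simp [hp]))
  simp only [padB3, zeroSlab, List.map_cons, List.map_append, List.map_map,
    Function.comp_def, List.headD_cons, List.map_nil]
  rw [pad2_z2 p0 hp0, List.map_congr_left hbody]

lemma planeA (p : List (List Bool)) (h : p ≠ []) :
    (growYplane p).map padRow = padB2 p := by
  obtain ⟨r, t, rfl⟩ := List.exists_cons_of_ne_nil h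
  simp [growYplane, padRow, padB2, padRow, zeroRow]

lemma slabA (s : List (List (List Bool))) (h1 : s ≠ []) (h2 : ∀ p ∈ s, p ≠ []) :
    (growZslab s).map (fun p => (growYplane p).map padRow) = padB3 s := by
  obtain ⟨p0, t, rfl⟩ := List.exists_cons_of_ne_nil h1
  have hp0 : p0 ≠ [] := h2 p0 (by simp)
  have hz : zeroPlane p0 ≠ [] := by
    simpa [zeroPlane] using hp0
  have hbody : t.map (fun p => (growYplane p).map padRow) = t.map padB2 :=
    List.map_congr_left (fun p hp => planeA p (h2 p (by simp [hp])))
  simp [growZslab, z2_idem, padB3, hbody,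
    planeA _ hp0, planeA _ hz, pad2_z2 _ hp0]

lemma zeroSlab_ne_nil {s : List (List (List Bool))} (h : s ≠ []) : zeroSlab s ≠ [] := by
  simpa [zeroSlab] using h

lemma zeroSlab_mem_ne_nil {s : List (List (List Bool))} (h : ∀ p ∈ s, p ≠ []) :
    ∀ p ∈ zeroSlab s, p ≠ [] := by
  intro p hp
  simp only [zeroSlab, List.mem_map] at hp
  obtain ⟨q, hq, rfl⟩ := hp
  simpa [zeroPlane] using h q hq

lemma topA (c : List (List (List (List Bool)))) (hpre : Pre_grow_cubes c) :
    grow_cubes c = padB4 c := by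
  obtain ⟨h1, h2⟩ := hpre
  obtain ⟨s0, t, rfl⟩ := List.exists_cons_of_ne_nil h1
  obtain ⟨hs0, hs0p⟩ := h2 s0 (by simp)
  have hbody : ∀ s ∈ t, (growZslab s).map (fun p => (growYplane p).map padRow) = padB3 s :=
    fun s hs => slabA s ((h2 s (by simp [hs])).1) ((h2 s (by simp [hs])).2)
  have hzslab : (growZslab (zeroSlab s0)).map (fun p => (growYplane p).map padRow)
      = padB3 (zeroSlab s0) := slabA _ (zeroSlab_ne_nil hs0) (zeroSlab_mem_ne_nil hs0p)
  simp only [grow_cubes, growW, List.headD_cons, List.cons_append,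
    List.map_cons, List.map_append, List.map_map, Function.comp_def, List.map_nil,
    z3_idem]
  rw [hzslab, pad3_z3 s0 hs0 hs0p]
  simp only [padB4, List.map_cons, List.map_append, List.map_map, Function.comp_def,
    List.headD_cons, List.cons_append, List.map_nil]
  rw [slabA s0 hs0 hs0p, List.map_congr_left hbody]

-- ===== VERDICT (by name: the statement is the Claim_ definition above) =====
theorem grow_cubes_spec : Claim_equal_grow_cubes := by
  intro cubes _ hpre
  unfold Spec_grow_cubes grow_cubes_alt
  exact topA cubes hpre
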